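-- pv_equiv track=rewrite | github.com/Ringodzilla/jra-scraper | jra_scraper/validation.py | build_race_info_rows
-- ===== SOURCE A (Python) =====
-- def build_race_info_rows(rows: list[dict[str, str]]) -> list[dict[str, str]]:
--     if not rows:
--         return []
--     race_info: dict[str, dict[str, str]] = {}
--     for row in rows:
--         race_id = row.get("race_id", "")
--         if not race_id:
--             continue
--         if race_id not in race_info:
--             race_info[race_id] = {
--                 "race_id": race_id,
--                 "date": row.get("date", ""),
--                 "race_name": row.get("race_name", ""),
--                 "course": row.get("course", ""),
--                 "distance": row.get("distance", ""),
--                 "field_size": row.get("field_size", ""),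
--                 "race_pace": row.get("race_pace", ""),
--                 "pace_maker_flag": row.get("pace_maker_flag", ""),
--                 "track_condition": row.get("track_condition", ""),
--                 "weather": row.get("weather", ""),
--             }
--             continue
--         current = race_info[race_id]
--         for key in ("field_size", "race_pace", "pace_maker_flag", "track_condition", "weather"):
--             if not current.get(key) and row.get(key):
--                 current[key] = row[key]
--
--     return [race_info[k] for k in sorted(race_info.keys())]
-- ===== SOURCE B (Python) =====
-- def build_race_info_rows(rows: list[dict[str, str]]) -> list[dict[str, str]]:
--     # Group rows by race_id (insertion order), skipping empty race_ids.
--     groups: dict[str, list[dict[str, str]]] = {}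
--     for row in rows:
--         rid = row.get("race_id", "")
--         if rid:
--             groups.setdefault(rid, []).append(row)
--
--     def first_truthy(group, key):
--         for r in group:
--             v = r.get(key, "")
--             if v:
--                 return v
--         return ""
--
--     result = []
--     for rid in sorted(groups):
--         g = groups[rid]
--         first = g[0]
--         rec = {
--             "race_id": rid,
--             "date": first.get("date", ""),
--             "race_name": first.get("race_name", ""),
--             "course": first.get("course", ""),
--             "distance": first.get("distance", ""),
--         }
--         for key in ("field_size", "race_pace", "pace_maker_flag", "track_condition", "weather"):
--             rec[key] = first_truthy(g, key)
--         result.append(rec)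
--     return result
-- ===== Notes on version B (the rewrite author's own statement) =====
-- stated objective: alternative
-- what changed: Replaces A's incremental merge (a dict of records mutated in place as rows stream by) with a two-pass decomposition: first group rows by race_id into an order-preserving dict of lists, then build each record directly, taking static fields from the group's first row and each fill-in field as the first truthy value scanned across the group.
import Mathlib
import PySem

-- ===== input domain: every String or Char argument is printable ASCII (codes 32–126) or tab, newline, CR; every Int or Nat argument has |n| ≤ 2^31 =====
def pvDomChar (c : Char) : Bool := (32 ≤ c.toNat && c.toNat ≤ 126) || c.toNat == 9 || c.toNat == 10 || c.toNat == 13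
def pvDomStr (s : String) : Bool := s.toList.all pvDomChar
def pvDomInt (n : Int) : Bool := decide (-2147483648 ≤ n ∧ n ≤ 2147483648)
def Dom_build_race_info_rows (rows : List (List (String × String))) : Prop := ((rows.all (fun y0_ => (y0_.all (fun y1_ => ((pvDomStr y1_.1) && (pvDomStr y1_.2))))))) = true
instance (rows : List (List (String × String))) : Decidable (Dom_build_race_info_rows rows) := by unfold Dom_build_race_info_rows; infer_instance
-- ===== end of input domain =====

-- B replaces A's incremental in-place merge with a group-by-race_id pass followed by a direct
-- per-group record build (alternative decomposition, same cost); return values proved equal.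

-- ===== PORT A =====
def rowGet (row : List (String × String)) (k : String) : String :=
  (PySem.Dict.mk row).getD k ""

def fillKeys : List String :=
  ["field_size", "race_pace", "pace_maker_flag", "track_condition", "weather"]

def newRec (race_id : String) (row : List (String × String)) : PySem.Dict String String :=
  PySem.Dict.mk [("race_id", race_id), ("date", rowGet row "date"),
    ("race_name", rowGet row "race_name"), ("course", rowGet row "course"),
    ("distance", rowGet row "distance"), ("field_size", rowGet row "field_size"),
    ("race_pace", rowGet row "race_pace"), ("pace_maker_flag", rowGet row "pace_maker_flag"),
    ("track_condition", rowGet row "track_condition"), ("weather", rowGet row "weather")]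

def fillStep (cur : PySem.Dict String String) (row : List (String × String)) :
    PySem.Dict String String :=
  fillKeys.foldl (fun cur key =>
    if ((cur.get? key).getD "" = "" ∧ rowGet row key ≠ "") then
      cur.insert key (rowGet row key)
    else cur) cur

def stepA (ri : PySem.Dict String (PySem.Dict String String))
    (row : List (String × String)) : PySem.Dict String (PySem.Dict String String) :=
  let race_id := rowGet row "race_id"
  if race_id = "" then ri
  else if ri.contains race_id = false then
    ri.insert race_id (newRec race_id row)
  else
    ri.insert race_id (fillStep ((ri.get? race_id).getD PySem.Dict.empty) row)

def build_race_info_rows (rows : List (List (String × String))) :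
    List (List (String × String)) :=
  if rows = [] then []
  else
    let race_info := rows.foldl stepA PySem.Dict.empty
    (PySem.List.sorted race_info.keys (fun k => k) false).map
      (fun k => ((race_info.get? k).getD PySem.Dict.empty).items)

-- ===== PORT B =====
def firstTruthy (group : List (List (String × String))) (key : String) : String :=
  match group with
  | [] => ""
  | r :: rest => let v := rowGet r key; if v ≠ "" then v else firstTruthy rest key

def mkRec (rid : String) (g : List (List (String × String))) : List (String × String) :=
  match g with
  | [] => []
  | first :: _ =>
    [("race_id", rid), ("date", rowGet first "date"), ("race_name", rowGet first "race_name"),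
     ("course", rowGet first "course"), ("distance", rowGet first "distance"),
     ("field_size", firstTruthy g "field_size"), ("race_pace", firstTruthy g "race_pace"),
     ("pace_maker_flag", firstTruthy g "pace_maker_flag"),
     ("track_condition", firstTruthy g "track_condition"),
     ("weather", firstTruthy g "weather")]

def stepB (d : PySem.Dict String (List (List (String × String))))
    (row : List (String × String)) : PySem.Dict String (List (List (String × String))) :=
  let rid := rowGet row "race_id"
  if rid = "" then d else d.modify rid [] (· ++ [row])

def build_race_info_rows_alt (rows : List (List (String × String))) :
    List (List (String × String)) :=
  let groups := rows.foldl stepB PySem.Dict.empty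
  (PySem.List.sorted groups.keys (fun k => k) false).map
    (fun rid => mkRec rid (groups.getD rid []))

-- ===== PRECONDITION & SPEC =====
def Spec_build_race_info_rows (rows : List (List (String × String))) (out : List (List (String × String))) : Prop := out = build_race_info_rows_alt rows
instance (rows : List (List (String × String))) (out : List (List (String × String))) : Decidable (Spec_build_race_info_rows rows out) := by unfold Spec_build_race_info_rows; infer_instance

-- ===== CLAIM (what is proved, stated in full; the proofs are below) =====
def Claim_equal_build_race_info_rows : Prop := ∀ (rows : List (List (String × String))), Dom_build_race_info_rows rows → Spec_build_race_info_rows rows (build_race_info_rows rows)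

-- ===== LEMMAS AND PROOFS =====
def upd (v : String) (row : List (String × String)) (key : String) : String :=
  if v = "" ∧ rowGet row key ≠ "" then rowGet row key else v

theorem step_field_size (a b c d e f g h i j : String) (row : List (String × String)) :
    (if (((PySem.Dict.mk [("race_id", a), ("date", b), ("race_name", c), ("course", d), ("distance", e), ("field_size", f), ("race_pace", g), ("pace_maker_flag", h), ("track_condition", i), ("weather", j)]).get? "field_size").getD "" = "" ∧ rowGet row "field_size" ≠ "") then
      (PySem.Dict.mk [("race_id", a), ("date", b), ("race_name", c), ("course", d), ("distance", e), ("field_size", f), ("race_pace", g), ("pace_maker_flag", h), ("track_condition", i), ("weather", j)]).insert "field_size" (rowGet row "field_size")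
    else PySem.Dict.mk [("race_id", a), ("date", b), ("race_name", c), ("course", d), ("distance", e), ("field_size", f), ("race_pace", g), ("pace_maker_flag", h), ("track_condition", i), ("weather", j)])
    = PySem.Dict.mk [("race_id", a), ("date", b), ("race_name", c), ("course", d), ("distance", e), ("field_size", upd f row "field_size"), ("race_pace", g), ("pace_maker_flag", h), ("track_condition", i), ("weather", j)] := by
  rw [show ((PySem.Dict.mk [("race_id", a), ("date", b), ("race_name", c), ("course", d), ("distance", e), ("field_size", f), ("race_pace", g), ("pace_maker_flag", h), ("track_condition", i), ("weather", j)]).get? "field_size").getD "" = f from rfl]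
  simp only [upd]; split_ifs with h1
  · rfl
  · rfl

theorem step_race_pace (a b c d e f g h i j : String) (row : List (String × String)) :
    (if (((PySem.Dict.mk [("race_id", a), ("date", b), ("race_name", c), ("course", d), ("distance", e), ("field_size", f), ("race_pace", g), ("pace_maker_flag", h), ("track_condition", i), ("weather", j)]).get? "race_pace").getD "" = "" ∧ rowGet row "race_pace" ≠ "") then
      (PySem.Dict.mk [("race_id", a), ("date", b), ("race_name", c), ("course", d), ("distance", e), ("field_size", f), ("race_pace", g), ("pace_maker_flag", h), ("track_condition", i), ("weather", j)]).insert "race_pace" (rowGet row "race_pace")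
    else PySem.Dict.mk [("race_id", a), ("date", b), ("race_name", c), ("course", d), ("distance", e), ("field_size", f), ("race_pace", g), ("pace_maker_flag", h), ("track_condition", i), ("weather", j)])
    = PySem.Dict.mk [("race_id", a), ("date", b), ("race_name", c), ("course", d), ("distance", e), ("field_size", f), ("race_pace", upd g row "race_pace"), ("pace_maker_flag", h), ("track_condition", i), ("weather", j)] := by
  rw [show ((PySem.Dict.mk [("race_id", a), ("date", b), ("race_name", c), ("course", d), ("distance", e), ("field_size", f), ("race_pace", g), ("pace_maker_flag", h), ("track_condition", i), ("weather", j)]).get? "race_pace").getD "" = g from rfl]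
  simp only [upd]; split_ifs with h1
  · rfl
  · rfl

theorem step_pace_maker_flag (a b c d e f g h i j : String) (row : List (String × String)) :
    (if (((PySem.Dict.mk [("race_id", a), ("date", b), ("race_name", c), ("course", d), ("distance", e), ("field_size", f), ("race_pace", g), ("pace_maker_flag", h), ("track_condition", i), ("weather", j)]).get? "pace_maker_flag").getD "" = "" ∧ rowGet row "pace_maker_flag" ≠ "") then
      (PySem.Dict.mk [("race_id", a), ("date", b), ("race_name", c), ("course", d), ("distance", e), ("field_size", f), ("race_pace", g), ("pace_maker_flag", h), ("track_condition", i), ("weather", j)]).insert "pace_maker_flag" (rowGet row "pace_maker_flag")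
    else PySem.Dict.mk [("race_id", a), ("date", b), ("race_name", c), ("course", d), ("distance", e), ("field_size", f), ("race_pace", g), ("pace_maker_flag", h), ("track_condition", i), ("weather", j)])
    = PySem.Dict.mk [("race_id", a), ("date", b), ("race_name", c), ("course", d), ("distance", e), ("field_size", f), ("race_pace", g), ("pace_maker_flag", upd h row "pace_maker_flag"), ("track_condition", i), ("weather", j)] := by
  rw [show ((PySem.Dict.mk [("race_id", a), ("date", b), ("race_name", c), ("course", d), ("distance", e), ("field_size", f), ("race_pace", g), ("pace_maker_flag", h), ("track_condition", i), ("weather", j)]).get? "pace_maker_flag").getD "" = h from rfl]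
  simp only [upd]; split_ifs with h1
  · rfl
  · rfl

theorem step_track_condition (a b c d e f g h i j : String) (row : List (String × String)) :
    (if (((PySem.Dict.mk [("race_id", a), ("date", b), ("race_name", c), ("course", d), ("distance", e), ("field_size", f), ("race_pace", g), ("pace_maker_flag", h), ("track_condition", i), ("weather", j)]).get? "track_condition").getD "" = "" ∧ rowGet row "track_condition" ≠ "") then
      (PySem.Dict.mk [("race_id", a), ("date", b), ("race_name", c), ("course", d), ("distance", e), ("field_size", f), ("race_pace", g), ("pace_maker_flag", h), ("track_condition", i), ("weather", j)]).insert "track_condition" (rowGet row "track_condition")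
    else PySem.Dict.mk [("race_id", a), ("date", b), ("race_name", c), ("course", d), ("distance", e), ("field_size", f), ("race_pace", g), ("pace_maker_flag", h), ("track_condition", i), ("weather", j)])
    = PySem.Dict.mk [("race_id", a), ("date", b), ("race_name", c), ("course", d), ("distance", e), ("field_size", f), ("race_pace", g), ("pace_maker_flag", h), ("track_condition", upd i row "track_condition"), ("weather", j)] := by
  rw [show ((PySem.Dict.mk [("race_id", a), ("date", b), ("race_name", c), ("course", d), ("distance", e), ("field_size", f), ("race_pace", g), ("pace_maker_flag", h), ("track_condition", i), ("weather", j)]).get? "track_condition").getD "" = i from rfl]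
  simp only [upd]; split_ifs with h1
  · rfl
  · rfl

theorem step_weather (a b c d e f g h i j : String) (row : List (String × String)) :
    (if (((PySem.Dict.mk [("race_id", a), ("date", b), ("race_name", c), ("course", d), ("distance", e), ("field_size", f), ("race_pace", g), ("pace_maker_flag", h), ("track_condition", i), ("weather", j)]).get? "weather").getD "" = "" ∧ rowGet row "weather" ≠ "") then
      (PySem.Dict.mk [("race_id", a), ("date", b), ("race_name", c), ("course", d), ("distance", e), ("field_size", f), ("race_pace", g), ("pace_maker_flag", h), ("track_condition", i), ("weather", j)]).insert "weather" (rowGet row "weather")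
    else PySem.Dict.mk [("race_id", a), ("date", b), ("race_name", c), ("course", d), ("distance", e), ("field_size", f), ("race_pace", g), ("pace_maker_flag", h), ("track_condition", i), ("weather", j)])
    = PySem.Dict.mk [("race_id", a), ("date", b), ("race_name", c), ("course", d), ("distance", e), ("field_size", f), ("race_pace", g), ("pace_maker_flag", h), ("track_condition", i), ("weather", upd j row "weather")] := by
  rw [show ((PySem.Dict.mk [("race_id", a), ("date", b), ("race_name", c), ("course", d), ("distance", e), ("field_size", f), ("race_pace", g), ("pace_maker_flag", h), ("track_condition", i), ("weather", j)]).get? "weather").getD "" = j from rfl]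
  simp only [upd]; split_ifs with h1
  · rfl
  · rfl

theorem fillStep_rec (a b c d e f g h i j : String) (row : List (String × String)) :
    fillStep (PySem.Dict.mk [("race_id", a), ("date", b), ("race_name", c), ("course", d), ("distance", e), ("field_size", f), ("race_pace", g), ("pace_maker_flag", h), ("track_condition", i), ("weather", j)]) row = PySem.Dict.mk [("race_id", a), ("date", b), ("race_name", c), ("course", d), ("distance", e), ("field_size", upd f row "field_size"), ("race_pace", upd g row "race_pace"), ("pace_maker_flag", upd h row "pace_maker_flag"), ("track_condition", upd i row "track_condition"), ("weather", upd j row "weather")] := by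
  simp only [fillStep, fillKeys, List.foldl]
  rw [step_field_size, step_race_pace, step_pace_maker_flag, step_track_condition, step_weather]

def fillAll (v : String) (l : List (List (String × String))) (key : String) : String :=
  l.foldl (fun v row => upd v row key) v

theorem foldl_fillStep_rec (rest : List (List (String × String)))
    (a b c d e f g h i j : String) :
    rest.foldl fillStep (PySem.Dict.mk [("race_id", a), ("date", b), ("race_name", c),
      ("course", d), ("distance", e), ("field_size", f), ("race_pace", g),
      ("pace_maker_flag", h), ("track_condition", i), ("weather", j)])
    = PySem.Dict.mk [("race_id", a), ("date", b), ("race_name", c), ("course", d),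
      ("distance", e), ("field_size", fillAll f rest "field_size"),
      ("race_pace", fillAll g rest "race_pace"),
      ("pace_maker_flag", fillAll h rest "pace_maker_flag"),
      ("track_condition", fillAll i rest "track_condition"),
      ("weather", fillAll j rest "weather")] := by
  induction rest generalizing f g h i j with
  | nil => rfl
  | cons row rest ih =>
    simp only [List.foldl_cons, fillStep_rec, ih, fillAll, List.foldl_cons]

theorem fillAll_of_ne (v : String) (hv : v ≠ "") (l : List (List (String × String)))
    (key : String) : fillAll v l key = v := by
  induction l with
  | nil => rfl
  | cons row rest ih => simp only [fillAll, List.foldl_cons, upd, hv, false_and, if_neg,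
      not_false_iff] at ih ⊢; simpa [upd, hv] using ih

theorem fillAll_cons (v : String) (row : List (String × String))
    (rest : List (List (String × String))) (key : String) :
    fillAll v (row :: rest) key = fillAll (upd v row key) rest key := rfl

theorem fillAll_empty (l : List (List (String × String))) (key : String) :
    fillAll "" l key = firstTruthy l key := by
  induction l with
  | nil => rfl
  | cons row rest ih =>
    rw [fillAll_cons]
    by_cases hr : rowGet row key = ""
    · rw [show upd "" row key = "" by simp [upd, hr], ih]
      simp [firstTruthy, hr]
    · rw [show upd "" row key = rowGet row key by simp [upd, hr], fillAll_of_ne _ hr]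
      simp [firstTruthy, hr]

theorem fillAll_eq_firstTruthy (first : List (String × String))
    (rest : List (List (String × String))) (key : String) :
    fillAll (rowGet first key) rest key = firstTruthy (first :: rest) key := by
  by_cases h : rowGet first key = ""
  · rw [h, fillAll_empty]; simp [firstTruthy, h]
  · rw [fillAll_of_ne _ h, firstTruthy]; simp [h]

def ridOf (row : List (String × String)) : String := rowGet row "race_id"

def filt (rows : List (List (String × String))) : List (List (String × String)) :=
  rows.filter (fun row => decide (ridOf row ≠ ""))

def grp (k : String) (rows : List (List (String × String))) :
    List (List (String × String)) :=
  (filt rows).filter (fun row => ridOf row == k)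

def valA (ri : PySem.Dict String (PySem.Dict String String))
    (row : List (String × String)) : PySem.Dict String String :=
  if ri.contains (ridOf row) = false then newRec (ridOf row) row
  else fillStep ((ri.get? (ridOf row)).getD PySem.Dict.empty) row

theorem stepA_eq (ri : PySem.Dict String (PySem.Dict String String))
    (row : List (String × String)) :
    stepA ri row = if ridOf row ≠ "" then ri.insert (ridOf row) (valA ri row) else ri := by
  unfold stepA valA ridOf
  by_cases h : rowGet row "race_id" = ""
  · simp [h]
  · simp only [h, if_neg, not_false_iff]
    split_ifs <;> simp_all

theorem foldA_filter (rows : List (List (String × String)))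
    (d : PySem.Dict String (PySem.Dict String String)) :
    rows.foldl stepA d
    = (filt rows).foldl (fun ri row => ri.insert (ridOf row) (valA ri row)) d := by
  have h1 := PySem.List.foldl_congr_mem rows stepA
    (fun ri row => if ridOf row ≠ "" then ri.insert (ridOf row) (valA ri row) else ri) d
    (fun acc x _ => stepA_eq acc x)
  rw [h1]
  exact PySem.List.foldl_ite_eq_foldl_filter _ _ _ _

theorem foldB_filter (rows : List (List (String × String)))
    (d : PySem.Dict String (List (List (String × String)))) :
    rows.foldl stepB d
    = (filt rows).foldl (fun d row => d.modify (ridOf row) [] (· ++ [row])) d := by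
  have h1 := PySem.List.foldl_congr_mem rows stepB
    (fun d row => if ridOf row ≠ "" then d.modify (ridOf row) [] (· ++ [row]) else d) d
    (fun acc x _ => by
      simp only [stepB, ridOf]
      split_ifs <;> simp_all)
  rw [h1]
  exact PySem.List.foldl_ite_eq_foldl_filter _ _ _ _

theorem keysA (rows : List (List (String × String))) :
    (rows.foldl stepA PySem.Dict.empty).keys = PySem.Set.ofList ((filt rows).map ridOf) := by
  rw [foldA_filter, PySem.Dict.keys_foldl_insert_key]
  simp [PySem.Dict.keys_empty, PySem.Set.ofList_eq_foldl, PySem.Set.update]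

theorem keysB (rows : List (List (String × String))) :
    (rows.foldl stepB PySem.Dict.empty).keys = PySem.Set.ofList ((filt rows).map ridOf) := by
  rw [foldB_filter, PySem.Dict.keys_foldl_modify_key]
  simp [PySem.Dict.keys_empty, PySem.Set.ofList_eq_foldl, PySem.Set.update]

theorem filt_cons_pos (row : List (String × String)) (rest : List (List (String × String)))
    (h0 : ridOf row ≠ "") : filt (row :: rest) = row :: filt rest := by
  simp [filt, h0]

theorem filt_cons_neg (row : List (String × String)) (rest : List (List (String × String)))
    (h0 : ridOf row = "") : filt (row :: rest) = filt rest := by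
  simp [filt, h0]

theorem grp_cons_skip (k : String) (row : List (String × String))
    (rest : List (List (String × String))) (h0 : ridOf row = "") :
    grp k (row :: rest) = grp k rest := by
  unfold grp
  rw [filt_cons_neg row rest h0]

theorem grp_cons_hit (k : String) (row : List (String × String))
    (rest : List (List (String × String))) (h0 : ridOf row ≠ "") (hkk : ridOf row = k) :
    grp k (row :: rest) = row :: grp k rest := by
  unfold grp
  rw [filt_cons_pos row rest h0, List.filter_cons, if_pos (by simp [hkk])]

theorem grp_cons_miss (k : String) (row : List (String × String))
    (rest : List (List (String × String))) (h0 : ridOf row ≠ "") (hkk : ridOf row ≠ k) :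
    grp k (row :: rest) = grp k rest := by
  unfold grp
  rw [filt_cons_pos row rest h0, List.filter_cons, if_neg (by simp [hkk])]

def recFold (o : Option (PySem.Dict String String))
    (g : List (List (String × String))) : Option (PySem.Dict String String) :=
  g.foldl (fun o row =>
    match o with
    | none => some (newRec (ridOf row) row)
    | some cur => some (fillStep cur row)) o

theorem recFold_some (g : List (List (String × String))) (cur : PySem.Dict String String) :
    recFold (some cur) g = some (g.foldl fillStep cur) := by
  induction g generalizing cur with
  | nil => rfl
  | cons row rest ih => simp only [recFold, List.foldl_cons] at ih ⊢; exact ih _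

theorem getA (k : String) (_hk : k ≠ "") (rows : List (List (String × String))) :
    ∀ d : PySem.Dict String (PySem.Dict String String),
    (rows.foldl stepA d).get? k = recFold (d.get? k) (grp k rows) := by
  induction rows with
  | nil => intro d; rfl
  | cons row rest ih =>
    intro d
    by_cases h0 : ridOf row = ""
    · have hstep : stepA d row = d := by
        simp only [stepA]
        rw [if_pos (by simpa [ridOf] using h0)]
      rw [List.foldl_cons, hstep, grp_cons_skip k row rest h0]
      exact ih d
    · by_cases hkk : ridOf row = k
      · have hstep : stepA d row = d.insert k (valA d row) := by
          rw [stepA_eq, if_pos h0, hkk]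
        rw [List.foldl_cons, hstep, grp_cons_hit k row rest h0 hkk, ih,
          PySem.Dict.get?_insert_self]
        simp only [recFold, List.foldl_cons]
        congr 1
        rw [valA, hkk, PySem.Dict.contains_eq_isSome_get?]
        cases hd : d.get? k with
        | none => simp
        | some cur => simp
      · have hstep : (stepA d row).get? k = d.get? k := by
          rw [stepA_eq, if_pos h0]
          exact PySem.Dict.get?_insert_of_ne d _ (Ne.symm hkk)
        rw [List.foldl_cons, grp_cons_miss k row rest h0 hkk, ← hstep]
        exact ih _

theorem getB (k : String) (rows : List (List (String × String))) :
    (rows.foldl stepB PySem.Dict.empty).getD k [] = grp k rows := by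
  rw [foldB_filter]
  have h1 : (filt rows).foldl (fun d row => d.modify (ridOf row) [] (· ++ [row]))
      PySem.Dict.empty
      = ((filt rows).map (fun row => (ridOf row, row))).foldl
          (fun d p => d.modify p.1 [] (· ++ [p.2])) PySem.Dict.empty := by
    rw [List.foldl_map]
  rw [h1, PySem.Dict.getD_foldl_modify_append]
  simp only [PySem.Dict.getD_empty, List.nil_append, List.filter_map, grp]
  rw [List.map_map]
  simp only [Function.comp_def]
  induction (filt rows) with
  | nil => rfl
  | cons r t ih =>
    by_cases h : ridOf r == k <;> simp [h, ih]

theorem grp_mem_rid (k : String) (row : List (String × String))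
    (rows : List (List (String × String))) (h : row ∈ grp k rows) : ridOf row = k := by
  unfold grp at h
  have := (List.mem_filter.mp h).2
  exact eq_of_beq this

theorem mem_keys_facts (k : String) (rows : List (List (String × String)))
    (h : k ∈ (filt rows).map ridOf) : k ≠ "" ∧ grp k rows ≠ [] := by
  obtain ⟨row0, hrow0, hrid⟩ := List.mem_map.mp h
  have hmem := List.mem_filter.mp hrow0
  have hne : ridOf row0 ≠ "" := by simpa using hmem.2
  constructor
  · exact hrid ▸ hne
  · have : row0 ∈ grp k rows := by
      unfold grp
      exact List.mem_filter.mpr ⟨hrow0, by simp [hrid]⟩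
    exact List.ne_nil_of_mem this

theorem main_eq (rows : List (List (String × String))) :
    build_race_info_rows rows = build_race_info_rows_alt rows := by
  by_cases hrows : rows = []
  · subst hrows; rfl
  · simp only [build_race_info_rows, build_race_info_rows_alt, if_neg hrows]
    rw [keysA, keysB]
    apply List.map_congr_left
    intro k hk
    have hkmem : k ∈ (filt rows).map ridOf := by
      have h1 := (PySem.List.sorted_perm ((filt rows).map ridOf |> PySem.Set.ofList)
        (fun k => k) false).mem_iff.mp hk
      exact (PySem.Set.mem_ofList _ _).mp h1
    obtain ⟨hkne, hgrp⟩ := mem_keys_facts k rows hkmem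
    obtain ⟨first, rest, hfr⟩ : ∃ f r, grp k rows = f :: r := by
      cases h : grp k rows with
      | nil => exact absurd h hgrp
      | cons f r => exact ⟨f, r, rfl⟩
    have hfirst : ridOf first = k :=
      grp_mem_rid k first rows (hfr ▸ List.mem_cons_self)
    rw [getA k hkne rows PySem.Dict.empty, getB k rows, hfr,
      PySem.Dict.get?_empty]
    simp only [recFold, List.foldl_cons]
    rw [show (List.foldl (fun o row =>
        match o with
        | none => some (newRec (ridOf row) row)
        | some cur => some (fillStep cur row))
        (some (newRec (ridOf first) first)) rest) = recFold (some (newRec (ridOf first) first)) rest from rfl,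
      recFold_some]
    simp only [Option.getD_some]
    rw [newRec, hfirst, foldl_fillStep_rec]
    show _ = mkRec k (first :: rest)
    simp only [mkRec, fillAll_eq_firstTruthy]

-- ===== VERDICT (by name: the statement is the Claim_ definition above) =====
theorem build_race_info_rows_spec : Claim_equal_build_race_info_rows := by
  intro rows _
  exact main_eq rows
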